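-- pv_equiv track=rewrite | github.com/rohanvinaik/AuDHD_Correlation_Study | src/audhd_correlation/reporting/supplementary.py | create_data_dictionary
-- ===== SOURCE A (Python) =====
-- from typing import Dict, List, Optional
--
-- def create_data_dictionary(feature_names: List[str]) -> str:
--     """
--     Create data dictionary table
--
--     Args:
--         feature_names: List of feature names
--
--     Returns:
--         HTML table string
--     """
--     # Categorize features
--     categories = {
--         'Genomics': [f for f in feature_names if any(x in f.lower() for x in ['snp', 'rs', 'gene', 'variant'])],
--         'Transcriptomics': [f for f in feature_names if any(x in f.lower() for x in ['expr', 'mrna', 'transcript'])],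
--         'Proteomics': [f for f in feature_names if any(x in f.lower() for x in ['protein', 'prot_'])],
--         'Metabolomics': [f for f in feature_names if any(x in f.lower() for x in ['metab', 'metabolite'])],
--         'Clinical': [f for f in feature_names if any(x in f.lower() for x in ['age', 'sex', 'bmi', 'score'])],
--         'Other': [],
--     }
--
--     # Collect unclassified
--     classified = set(sum(categories.values(), []))
--     categories['Other'] = [f for f in feature_names if f not in classified]
--
--     html = '<table class="data-dictionary">'
--     html += '<tr><th>Category</th><th>Feature</th><th>Description</th><th>Unit</th></tr>'
--
--     for category, features in categories.items():
--         if not features: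
--             continue
--
--         for i, feature in enumerate(features):
--             # Infer description
--             desc = _infer_feature_description(feature)
--             unit = _infer_unit(feature)
--
--             if i == 0:
--                 html += f'<tr><td rowspan="{len(features)}"><strong>{category}</strong></td>'
--             else:
--                 html += '<tr>'
--
--             html += f'<td>{feature}</td><td>{desc}</td><td>{unit}</td></tr>'
--
--     html += '</table>'
--
--     return html
--
-- def _infer_feature_description(feature: str) -> str:
--     """Infer feature description from name"""
--     feature_lower = feature.lower()
--
--     if 'age' in feature_lower:
--         return 'Patient age at enrollment'
--     elif 'sex' in feature_lower:
--         return 'Biological sex'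
--     elif 'bmi' in feature_lower:
--         return 'Body mass index'
--     elif 'expr' in feature_lower:
--         return 'Gene expression level'
--     elif 'protein' in feature_lower:
--         return 'Protein abundance'
--     elif 'metab' in feature_lower:
--         return 'Metabolite concentration'
--     elif 'snp' in feature_lower or 'rs' in feature_lower:
--         return 'Genetic variant'
--     else:
--         return 'Multi-omics feature'
--
-- def _infer_unit(feature: str) -> str:
--     """Infer measurement unit"""
--     feature_lower = feature.lower()
--
--     if 'age' in feature_lower:
--         return 'years'
--     elif 'bmi' in feature_lower:
--         return 'kg/m²'
--     elif 'expr' in feature_lower: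
--         return 'log2(TPM)'
--     elif 'protein' in feature_lower:
--         return 'log2(intensity)'
--     elif 'metab' in feature_lower:
--         return 'log2(abundance)'
--     elif 'score' in feature_lower:
--         return 'points'
--     else:
--         return 'normalized'
-- ===== SOURCE B (Python) =====
-- def create_data_dictionary(feature_names):
--     """Create data dictionary table (single pass over feature_names)."""
--     keyword_table = [
--         ('Genomics', ['snp', 'rs', 'gene', 'variant']),
--         ('Transcriptomics', ['expr', 'mrna', 'transcript']),
--         ('Proteomics', ['protein', 'prot_']),
--         ('Metabolomics', ['metab', 'metabolite']),
--         ('Clinical', ['age', 'sex', 'bmi', 'score']),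
--     ]
--     buckets = {cat: [] for cat, _ in keyword_table}
--     buckets['Other'] = []
--     for f in feature_names:
--         fl = f.lower()
--         matched = False
--         for cat, kws in keyword_table:
--             if any(k in fl for k in kws):
--                 buckets[cat].append(f)
--                 matched = True
--         if not matched:
--             buckets['Other'].append(f)
--
--     html = '<table class="data-dictionary">'
--     html += '<tr><th>Category</th><th>Feature</th><th>Description</th><th>Unit</th></tr>'
--     for category, features in buckets.items():
--         if not features:
--             continue
--         for i, feature in enumerate(features):
--             desc = _infer_feature_description(feature)
--             unit = _infer_unit(feature)
--             if i == 0: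
--                 html += f'<tr><td rowspan="{len(features)}"><strong>{category}</strong></td>'
--             else:
--                 html += '<tr>'
--             html += f'<td>{feature}</td><td>{desc}</td><td>{unit}</td></tr>'
--     html += '</table>'
--     return html
--
-- def _infer_feature_description(feature):
--     feature_lower = feature.lower()
--     if 'age' in feature_lower:
--         return 'Patient age at enrollment'
--     elif 'sex' in feature_lower:
--         return 'Biological sex'
--     elif 'bmi' in feature_lower:
--         return 'Body mass index'
--     elif 'expr' in feature_lower:
--         return 'Gene expression level'
--     elif 'protein' in feature_lower:
--         return 'Protein abundance'
--     elif 'metab' in feature_lower: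
--         return 'Metabolite concentration'
--     elif 'snp' in feature_lower or 'rs' in feature_lower:
--         return 'Genetic variant'
--     else:
--         return 'Multi-omics feature'
--
-- def _infer_unit(feature):
--     feature_lower = feature.lower()
--     if 'age' in feature_lower:
--         return 'years'
--     elif 'bmi' in feature_lower:
--         return 'kg/m²'
--     elif 'expr' in feature_lower:
--         return 'log2(TPM)'
--     elif 'protein' in feature_lower:
--         return 'log2(intensity)'
--     elif 'metab' in feature_lower:
--         return 'log2(abundance)'
--     elif 'score' in feature_lower:
--         return 'points'
--     else:
--         return 'normalized'
-- ===== Notes on version B (the rewrite author's own statement) =====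
-- stated objective: alternative
-- what changed: Replaces A's six separate filtering passes plus a set-based 'Other' reconstruction with a single pass over feature_names driven by an ordered keyword table, appending each feature to every matching bucket and to a pre-seeded 'Other' bucket when nothing matched; the HTML rendering is unchanged.
import Mathlib
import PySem

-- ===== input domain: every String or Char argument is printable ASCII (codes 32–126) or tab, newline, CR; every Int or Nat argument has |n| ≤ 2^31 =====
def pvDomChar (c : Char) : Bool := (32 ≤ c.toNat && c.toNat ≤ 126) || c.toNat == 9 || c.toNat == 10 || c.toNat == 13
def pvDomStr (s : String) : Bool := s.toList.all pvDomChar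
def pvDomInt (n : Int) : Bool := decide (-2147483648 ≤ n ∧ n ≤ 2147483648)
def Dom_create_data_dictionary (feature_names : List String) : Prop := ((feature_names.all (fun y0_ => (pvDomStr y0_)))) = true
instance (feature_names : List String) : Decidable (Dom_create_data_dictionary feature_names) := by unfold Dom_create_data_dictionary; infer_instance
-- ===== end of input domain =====

-- B re-decomposes A's six filtering passes into one pass over feature_names with a keyword table
-- and pre-seeded buckets (objective: alternative decomposition); identical HTML rendering.

-- ===== PORT A =====
-- _infer_feature_description
def pvInferDesc (feature : String) : String :=
  let fl := PySem.Str.lower feature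
  if PySem.Str.isIn "age" fl then "Patient age at enrollment"
  else if PySem.Str.isIn "sex" fl then "Biological sex"
  else if PySem.Str.isIn "bmi" fl then "Body mass index"
  else if PySem.Str.isIn "expr" fl then "Gene expression level"
  else if PySem.Str.isIn "protein" fl then "Protein abundance"
  else if PySem.Str.isIn "metab" fl then "Metabolite concentration"
  else if PySem.Str.isIn "snp" fl || PySem.Str.isIn "rs" fl then "Genetic variant"
  else "Multi-omics feature"

-- _infer_unit
def pvInferUnit (feature : String) : String :=
  let fl := PySem.Str.lower feature
  if PySem.Str.isIn "age" fl then "years"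
  else if PySem.Str.isIn "bmi" fl then "kg/m²"
  else if PySem.Str.isIn "expr" fl then "log2(TPM)"
  else if PySem.Str.isIn "protein" fl then "log2(intensity)"
  else if PySem.Str.isIn "metab" fl then "log2(abundance)"
  else if PySem.Str.isIn "score" fl then "points"
  else "normalized"

-- any(x in f.lower() for x in kws)
def pvMatchesA (kws : List String) (f : String) : Bool :=
  kws.any (fun x => PySem.Str.isIn x (PySem.Str.lower f))

-- inner 'for i, feature in enumerate(features)' body (shared rendering code of both Pythons)
def pvRenderCat (html : String) (item : String × List String) : String :=
  let category := item.1
  let features := item.2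
  if features.isEmpty then html
  else
    features.zipIdx.foldl (fun html fi =>
      let feature := fi.1
      let i := fi.2
      let desc := pvInferDesc feature
      let unit := pvInferUnit feature
      let html :=
        if i = 0 then
          html ++ "<tr><td rowspan=\"" ++ PySem.Int.toStr (features.length : Int)
               ++ "\"><strong>" ++ category ++ "</strong></td>"
        else html ++ "<tr>"
      html ++ "<td>" ++ feature ++ "</td><td>" ++ desc ++ "</td><td>" ++ unit ++ "</td></tr>") html

-- the dict 'categories' has six distinct literal keys in this fixed order (the 'Other'
-- assignment overwrites in place), so its .items() is exactly the six-pair list below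
def create_data_dictionary (feature_names : List String) : String :=
  let gen := feature_names.filter (pvMatchesA ["snp", "rs", "gene", "variant"])
  let tra := feature_names.filter (pvMatchesA ["expr", "mrna", "transcript"])
  let pro := feature_names.filter (pvMatchesA ["protein", "prot_"])
  let met := feature_names.filter (pvMatchesA ["metab", "metabolite"])
  let cli := feature_names.filter (pvMatchesA ["age", "sex", "bmi", "score"])
  -- classified = set(sum(categories.values(), [])) — 'Other' is [] at that point
  let classified := PySem.Set.ofList (gen ++ tra ++ pro ++ met ++ cli)
  let other := feature_names.filter (fun f => !(PySem.Set.contains classified f))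
  let html := "<table class=\"data-dictionary\">"
  let html := html ++ "<tr><th>Category</th><th>Feature</th><th>Description</th><th>Unit</th></tr>"
  let html := [("Genomics", gen), ("Transcriptomics", tra), ("Proteomics", pro),
               ("Metabolomics", met), ("Clinical", cli), ("Other", other)].foldl pvRenderCat html
  html ++ "</table>"

-- ===== PORT B =====
def pvInferDescAlt (feature : String) : String :=
  let fl := PySem.Str.lower feature
  if PySem.Str.isIn "age" fl then "Patient age at enrollment"
  else if PySem.Str.isIn "sex" fl then "Biological sex"
  else if PySem.Str.isIn "bmi" fl then "Body mass index"
  else if PySem.Str.isIn "expr" fl then "Gene expression level"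
  else if PySem.Str.isIn "protein" fl then "Protein abundance"
  else if PySem.Str.isIn "metab" fl then "Metabolite concentration"
  else if PySem.Str.isIn "snp" fl || PySem.Str.isIn "rs" fl then "Genetic variant"
  else "Multi-omics feature"

def pvInferUnitAlt (feature : String) : String :=
  let fl := PySem.Str.lower feature
  if PySem.Str.isIn "age" fl then "years"
  else if PySem.Str.isIn "bmi" fl then "kg/m²"
  else if PySem.Str.isIn "expr" fl then "log2(TPM)"
  else if PySem.Str.isIn "protein" fl then "log2(intensity)"
  else if PySem.Str.isIn "metab" fl then "log2(abundance)"
  else if PySem.Str.isIn "score" fl then "points"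
  else "normalized"

-- any(k in fl for k in kws), fl already lowered once
def pvAnyKw (kws : List String) (fl : String) : Bool :=
  kws.any (fun k => PySem.Str.isIn k fl)

-- the six buckets, pre-seeded in the dict's fixed key order
structure PvBuckets where
  g : List String
  t : List String
  p : List String
  m : List String
  c : List String
  o : List String
deriving Repr, DecidableEq

-- body of B's single 'for f in feature_names' loop
def pvStepB (b : PvBuckets) (f : String) : PvBuckets :=
  let fl := PySem.Str.lower f
  let mg := pvAnyKw ["snp", "rs", "gene", "variant"] fl
  let mt := pvAnyKw ["expr", "mrna", "transcript"] fl
  let mp := pvAnyKw ["protein", "prot_"] fl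
  let mm := pvAnyKw ["metab", "metabolite"] fl
  let mc := pvAnyKw ["age", "sex", "bmi", "score"] fl
  { g := if mg then b.g ++ [f] else b.g
    t := if mt then b.t ++ [f] else b.t
    p := if mp then b.p ++ [f] else b.p
    m := if mm then b.m ++ [f] else b.m
    c := if mc then b.c ++ [f] else b.c
    o := if mg || mt || mp || mm || mc then b.o else b.o ++ [f] }

def pvRenderCatAlt (html : String) (item : String × List String) : String :=
  let category := item.1
  let features := item.2
  if features.isEmpty then html
  else
    features.zipIdx.foldl (fun html fi =>
      let feature := fi.1
      let i := fi.2
      let desc := pvInferDescAlt feature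
      let unit := pvInferUnitAlt feature
      let html :=
        if i = 0 then
          html ++ "<tr><td rowspan=\"" ++ PySem.Int.toStr (features.length : Int)
               ++ "\"><strong>" ++ category ++ "</strong></td>"
        else html ++ "<tr>"
      html ++ "<td>" ++ feature ++ "</td><td>" ++ desc ++ "</td><td>" ++ unit ++ "</td></tr>") html

def create_data_dictionary_alt (feature_names : List String) : String :=
  let b := feature_names.foldl pvStepB ⟨[], [], [], [], [], []⟩
  let html := "<table class=\"data-dictionary\">"
  let html := html ++ "<tr><th>Category</th><th>Feature</th><th>Description</th><th>Unit</th></tr>"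
  let html := [("Genomics", b.g), ("Transcriptomics", b.t), ("Proteomics", b.p),
               ("Metabolomics", b.m), ("Clinical", b.c), ("Other", b.o)].foldl pvRenderCatAlt html
  html ++ "</table>"

-- ===== PRECONDITION & SPEC =====
def Spec_create_data_dictionary (feature_names : List String) (out : String) : Prop := out = create_data_dictionary_alt feature_names
instance (feature_names : List String) (out : String) : Decidable (Spec_create_data_dictionary feature_names out) := by unfold Spec_create_data_dictionary; infer_instance

-- ===== CLAIM (what is proved, stated in full; the proofs are below) =====
def Claim_equal_create_data_dictionary : Prop := ∀ (feature_names : List String), Dom_create_data_dictionary feature_names → Spec_create_data_dictionary feature_names (create_data_dictionary feature_names)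

-- ===== LEMMAS AND PROOFS =====

-- the per-feature tests B applies, as standalone predicates
def pvPG (f : String) : Bool := pvAnyKw ["snp", "rs", "gene", "variant"] (PySem.Str.lower f)
def pvPT (f : String) : Bool := pvAnyKw ["expr", "mrna", "transcript"] (PySem.Str.lower f)
def pvPP (f : String) : Bool := pvAnyKw ["protein", "prot_"] (PySem.Str.lower f)
def pvPM (f : String) : Bool := pvAnyKw ["metab", "metabolite"] (PySem.Str.lower f)
def pvPC (f : String) : Bool := pvAnyKw ["age", "sex", "bmi", "score"] (PySem.Str.lower f)
def pvPO (f : String) : Bool := !(pvPG f || pvPT f || pvPP f || pvPM f || pvPC f)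

-- B's loop invariant: the fold computes the six filters, appended to the initial buckets
theorem pvFoldB (fs : List String) (b : PvBuckets) :
    fs.foldl pvStepB b =
      ⟨b.g ++ fs.filter pvPG, b.t ++ fs.filter pvPT, b.p ++ fs.filter pvPP,
       b.m ++ fs.filter pvPM, b.c ++ fs.filter pvPC, b.o ++ fs.filter pvPO⟩ := by
  induction fs generalizing b with
  | nil => simp
  | cons f fs ih =>
    simp only [List.foldl_cons, ih, List.filter_cons]
    show (⟨_, _, _, _, _, _⟩ : PvBuckets) = _
    simp only [pvStepB, pvPG, pvPT, pvPP, pvPM, pvPC, pvPO]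
    split_ifs <;> simp_all

-- A's 'Other' filter agrees with B's no-category-matched test on members of the list
theorem pvOtherEq (fs : List String) :
    fs.filter (fun f => !(PySem.Set.contains
        (PySem.Set.ofList (fs.filter pvPG ++ fs.filter pvPT ++ fs.filter pvPP
          ++ fs.filter pvPM ++ fs.filter pvPC)) f))
      = fs.filter pvPO := by
  apply List.filter_congr
  intro f hf
  have h : PySem.Set.contains
      (PySem.Set.ofList (fs.filter pvPG ++ fs.filter pvPT ++ fs.filter pvPP
        ++ fs.filter pvPM ++ fs.filter pvPC)) f
      = (pvPG f || pvPT f || pvPP f || pvPM f || pvPC f) := by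
    rw [Bool.eq_iff_iff]
    simp only [PySem.Set.contains_iff, PySem.Set.mem_ofList, List.mem_append, List.mem_filter]
    set bg := pvPG f; set bt := pvPT f; set bp := pvPP f; set bm := pvPM f; set bc := pvPC f
    cases bg <;> cases bt <;> cases bp <;> cases bm <;> cases bc <;> simp_all
  rw [h]; rfl

-- ===== VERDICT (by name: the statement is the Claim_ definition above) =====
theorem create_data_dictionary_spec : Claim_equal_create_data_dictionary := by
  intro fs _
  show create_data_dictionary fs = create_data_dictionary_alt fs
  unfold create_data_dictionary create_data_dictionary_alt
  rw [pvFoldB]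
  simp only [List.nil_append]
  have hr : pvRenderCatAlt = pvRenderCat := rfl
  have hg : fs.filter (pvMatchesA ["snp", "rs", "gene", "variant"]) = fs.filter pvPG := rfl
  have ht : fs.filter (pvMatchesA ["expr", "mrna", "transcript"]) = fs.filter pvPT := rfl
  have hp : fs.filter (pvMatchesA ["protein", "prot_"]) = fs.filter pvPP := rfl
  have hm : fs.filter (pvMatchesA ["metab", "metabolite"]) = fs.filter pvPM := rfl
  have hc : fs.filter (pvMatchesA ["age", "sex", "bmi", "score"]) = fs.filter pvPC := rfl
  simp only [hr, hg, ht, hp, hm, hc]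
  rw [pvOtherEq fs]
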